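-- pv_equiv track=rewrite | github.com/Cornil79/ai_mind_bot | faiss_router/funcs2.py | colorful_bar
-- ===== SOURCE A (Python) =====
-- def colorful_bar(length):
--     red = '\033[91m'  # код цвета для красного
--     yellow = '\033[93m'  # код цвета для желтого
--     green = '\033[92m'  # код цвета для зеленого
--     reset_color = '\033[0m'  # сброс цвета
--
--     bar = ''  # строка для хранения бара
--
--     for i in range(length, 0, -1):
--         if i <= 3:
--             bar += red + '*'  # добавляем красную звездочку
--         elif 4 <= i <= 7:
--             bar += yellow + '*'  # добавляем желтую звездочку
--         else:
--             bar += green + '*'  # добавляем зеленую звездочку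
--     return ' ' * (10 - length) + bar + reset_color  # добавляем пробелы слева от бара и возвращаем строку бара с сбросом цвета
-- ===== SOURCE B (Python) =====
-- def colorful_bar(length):
--     red = '\033[91m'
--     yellow = '\033[93m'
--     green = '\033[92m'
--     reset_color = '\033[0m'
--
--     g = max(0, length - 7)
--     y = max(0, min(7, length) - 3)
--     r = max(0, min(3, length))
--     bar = (green + '*') * g + (yellow + '*') * y + (red + '*') * r
--     return ' ' * (10 - length) + bar + reset_color
-- ===== Notes on version B (the rewrite author's own statement) =====
-- stated objective: faster
-- what changed: The per-star loop with a three-way range test on each i is replaced by three closed-form colour counts (green/yellow/red) and string repetition, removing the iteration entirely.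
import Mathlib
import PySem

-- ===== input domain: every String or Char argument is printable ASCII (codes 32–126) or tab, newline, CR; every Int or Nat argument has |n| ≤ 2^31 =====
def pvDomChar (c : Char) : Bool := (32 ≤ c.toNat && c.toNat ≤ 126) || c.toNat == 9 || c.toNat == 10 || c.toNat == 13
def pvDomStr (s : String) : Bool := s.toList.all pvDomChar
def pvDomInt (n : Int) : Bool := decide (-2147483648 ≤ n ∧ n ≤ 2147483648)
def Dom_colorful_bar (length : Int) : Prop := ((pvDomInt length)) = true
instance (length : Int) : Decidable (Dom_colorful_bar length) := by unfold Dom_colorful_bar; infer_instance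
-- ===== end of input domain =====

-- B replaces A's per-star countdown loop by three closed-form colour counts and
-- string repetition (objective: faster by a constant factor — no iteration, no
-- quadratic string appends).

-- Python string repetition s * n (empty for n ≤ 0); used by both ports for ' ' * (10 - length)
def pvStrRepGo (s : String) : Nat → String
  | 0 => ""
  | k + 1 => s ++ pvStrRepGo s k

def pvStrRep (s : String) (n : Int) : String := pvStrRepGo s n.toNat

-- ===== PORT A =====
def colorful_bar (length : Int) : String :=
  let red := "\x1b[91m"
  let yellow := "\x1b[93m"
  let green := "\x1b[92m"
  let reset_color := "\x1b[0m"
  let bar := (PySem.List.pyRange length 0 (-1)).foldl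
    (fun bar i =>
      if i ≤ 3 then bar ++ (red ++ "*")
      else if 4 ≤ i ∧ i ≤ 7 then bar ++ (yellow ++ "*")
      else bar ++ (green ++ "*")) ""
  pvStrRep " " (10 - length) ++ bar ++ reset_color

-- ===== PORT B =====
def colorful_bar_alt (length : Int) : String :=
  let red := "\x1b[91m"
  let yellow := "\x1b[93m"
  let green := "\x1b[92m"
  let reset_color := "\x1b[0m"
  let g := max 0 (length - 7)
  let y := max 0 (min 7 length - 3)
  let r := max 0 (min 3 length)
  let bar := pvStrRep (green ++ "*") g ++ pvStrRep (yellow ++ "*") y ++ pvStrRep (red ++ "*") r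
  pvStrRep " " (10 - length) ++ bar ++ reset_color

-- ===== PRECONDITION & SPEC =====
def Spec_colorful_bar (length : Int) (out : String) : Prop := out = colorful_bar_alt length
instance (length : Int) (out : String) : Decidable (Spec_colorful_bar length out) := by unfold Spec_colorful_bar; infer_instance

-- ===== CLAIM (what is proved, stated in full; the proofs are below) =====
def Claim_equal_colorful_bar : Prop := ∀ (length : Int), Dom_colorful_bar length → Spec_colorful_bar length (colorful_bar length)

-- ===== LEMMAS AND PROOFS =====

theorem pvStrRep_nonpos (s : String) (n : Int) (h : n ≤ 0) : pvStrRep s n = "" := by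
  unfold pvStrRep
  have : n.toNat = 0 := by omega
  rw [this]
  rfl

theorem pvStrRep_succ (s : String) (n : Int) (h : 0 < n) : pvStrRep s n = s ++ pvStrRep s (n - 1) := by
  unfold pvStrRep
  have : n.toNat = (n - 1).toNat + 1 := by omega
  rw [this]
  rfl

theorem foldl_step_prefix :
    ∀ (l : List Int) (init : String),
      l.foldl
        (fun bar i =>
          if i ≤ 3 then bar ++ ("\x1b[91m" ++ "*")
          else if 4 ≤ i ∧ i ≤ 7 then bar ++ ("\x1b[93m" ++ "*")
          else bar ++ ("\x1b[92m" ++ "*")) init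
      = init ++ l.foldl
        (fun bar i =>
          if i ≤ 3 then bar ++ ("\x1b[91m" ++ "*")
          else if 4 ≤ i ∧ i ≤ 7 then bar ++ ("\x1b[93m" ++ "*")
          else bar ++ ("\x1b[92m" ++ "*")) "" := by
  intro l
  induction l with
  | nil => intro init; simp [List.foldl]
  | cons a t ih =>
    intro init
    simp only [List.foldl]
    split_ifs <;>
      · conv_lhs => rw [ih]
        conv_rhs => rw [ih]
        simp [String.append_assoc]

-- the closed-form bar of B, abbreviated
def pvBarB (n : Int) : String :=
  pvStrRep ("\x1b[92m" ++ "*") (max 0 (n - 7)) ++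
  pvStrRep ("\x1b[93m" ++ "*") (max 0 (min 7 n - 3)) ++
  pvStrRep ("\x1b[91m" ++ "*") (max 0 (min 3 n))

theorem bar_eq (m : Nat) : ∀ n : Int, n.toNat = m →
    (PySem.List.pyRange n 0 (-1)).foldl
      (fun bar i =>
        if i ≤ 3 then bar ++ ("\x1b[91m" ++ "*")
        else if 4 ≤ i ∧ i ≤ 7 then bar ++ ("\x1b[93m" ++ "*")
        else bar ++ ("\x1b[92m" ++ "*")) "" = pvBarB n := by
  induction m with
  | zero =>
    intro n hn
    have hle : n ≤ 0 := by omega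
    rw [PySem.List.pyRange_neg_one_eq_nil hle]
    have h1 : max 0 (n - 7) = 0 := by omega
    have h2 : max 0 (min 7 n - 3) = 0 := by omega
    have h3 : max 0 (min 3 n) = 0 := by omega
    simp [pvBarB, h1, h2, h3, pvStrRep_nonpos, List.foldl]
  | succ m ih =>
    intro n hn
    have hpos : 0 < n := by omega
    rw [PySem.List.pyRange_neg_one_cons hpos]
    simp only [List.foldl]
    rw [foldl_step_prefix]
    rw [ih (n - 1) (by omega)]
    by_cases h3 : n ≤ 3
    · have e1 : max 0 (n - 7) = 0 := by omega
      have e1' : max 0 ((n - 1) - 7) = 0 := by omega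
      have e2 : max 0 (min 7 n - 3) = 0 := by omega
      have e2' : max 0 (min 7 (n - 1) - 3) = 0 := by omega
      have e3 : max 0 (min 3 n) = n := by omega
      have e3' : max 0 (min 3 (n - 1)) = n - 1 := by omega
      simp only [pvBarB, e1, e1', e2, e2', e3, e3', if_pos h3]
      rw [pvStrRep_succ _ n hpos]
      simp [pvStrRep_nonpos, String.append_assoc]
    · by_cases h7 : n ≤ 7
      · have e1 : max 0 (n - 7) = 0 := by omega
        have e1' : max 0 ((n - 1) - 7) = 0 := by omega
        have e2 : max 0 (min 7 n - 3) = n - 3 := by omega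
        have e2' : max 0 (min 7 (n - 1) - 3) = n - 4 := by omega
        have e3 : max 0 (min 3 n) = 3 := by omega
        have e3' : max 0 (min 3 (n - 1)) = 3 := by omega
        simp only [pvBarB, e1, e1', e2, e2', e3, e3', if_neg h3,
          if_pos (show 4 ≤ n ∧ n ≤ 7 by omega)]
        rw [pvStrRep_succ _ (n - 3) (by omega)]
        have : n - 3 - 1 = n - 4 := by omega
        rw [this]
        simp [pvStrRep_nonpos, String.append_assoc]
      · have e1 : max 0 (n - 7) = n - 7 := by omega
        have e1' : max 0 ((n - 1) - 7) = n - 8 := by omega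
        have e2 : max 0 (min 7 n - 3) = 4 := by omega
        have e2' : max 0 (min 7 (n - 1) - 3) = 4 := by omega
        have e3 : max 0 (min 3 n) = 3 := by omega
        have e3' : max 0 (min 3 (n - 1)) = 3 := by omega
        simp only [pvBarB, e1, e1', e2, e2', e3, e3', if_neg h3,
          if_neg (show ¬(4 ≤ n ∧ n ≤ 7) by omega)]
        rw [pvStrRep_succ _ (n - 7) (by omega)]
        have : n - 7 - 1 = n - 8 := by omega
        rw [this]
        simp [String.append_assoc]

-- ===== VERDICT (by name: the statement is the Claim_ definition above) =====
theorem colorful_bar_spec : Claim_equal_colorful_bar := by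
  intro length _
  unfold Spec_colorful_bar colorful_bar colorful_bar_alt
  simp only []
  rw [bar_eq length.toNat length rfl]
  simp [pvBarB, String.append_assoc]
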